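-- pv_equiv track=rewrite | github.com/SACGF/variantgrid | sync/shariant/variant_grid_upload.py | batch_iterator_end
-- ===== SOURCE A (Python) =====
-- from typing import Iterable, TypeVar, Union
--
-- T = TypeVar("T")
--
-- def batch_iterator_end(iterable: Iterable[T], batch_size: int = 10) -> Iterable[Union[list[T], bool]]:
--     """
--     Creates an iterator of list of T from an iterator of T, as well as providing a boolean to indicate if
--     this is the final batch
--     :param iterable: Iterable of T
--     :param batch_size: Max number of items allowed in a batch (all but the last batch should be this size)
--     :return: Union of list of T, and a boolean True if the batch is final, False otherwise
--     """
--     batch = []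
--     pending_batch = None
--     for record in iterable:
--         if pending_batch:
--             yield pending_batch, False
--             pending_batch = None
--
--         batch.append(record)
--         if len(batch) >= batch_size:
--             pending_batch = batch
--             batch = []
--
--     if pending_batch:
--         yield pending_batch, True
--     if batch:
--         yield batch, True
-- ===== SOURCE B (Python) =====
-- from typing import Iterable, TypeVar, Union
--
-- T = TypeVar("T")
--
-- def batch_iterator_end(iterable: Iterable[T], batch_size: int = 10) -> Iterable[Union[list[T], bool]]:
--     """Two-phase: a plain chunk generator, then a one-step lookahead adds the final flag."""
--     def chunks():
--         batch = []
--         for record in iterable: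
--             batch.append(record)
--             if len(batch) >= batch_size:
--                 yield batch
--                 batch = []
--         if batch:
--             yield batch
--
--     held = None
--     for chunk in chunks():
--         if held is not None:
--             yield held, False
--         held = chunk
--     if held is not None:
--         yield held, True
-- ===== Notes on version B (the rewrite author's own statement) =====
-- stated objective: alternative
-- what changed: A's single interleaved state machine (batch + pending_batch flushed with False on the next record) is split into two phases: an inner generator yielding plain chunks, and an outer one-step lookahead that holds the previous chunk and flags only the last one True.
import Mathlib
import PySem

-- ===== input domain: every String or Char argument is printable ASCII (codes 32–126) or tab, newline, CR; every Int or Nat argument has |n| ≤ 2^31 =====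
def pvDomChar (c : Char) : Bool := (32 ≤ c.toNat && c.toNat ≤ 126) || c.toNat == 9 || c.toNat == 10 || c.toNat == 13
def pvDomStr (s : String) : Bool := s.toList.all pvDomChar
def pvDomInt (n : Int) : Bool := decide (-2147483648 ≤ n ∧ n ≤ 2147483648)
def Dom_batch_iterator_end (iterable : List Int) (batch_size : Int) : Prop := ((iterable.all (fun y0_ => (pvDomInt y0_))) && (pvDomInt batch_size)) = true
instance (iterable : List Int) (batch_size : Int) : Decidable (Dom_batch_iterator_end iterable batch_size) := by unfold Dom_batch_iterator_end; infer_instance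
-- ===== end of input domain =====

-- B re-decomposes A's single interleaved state machine into a plain chunker plus a
-- one-step lookahead that adds the final flag (objective: alternative; same cost).

-- ===== PORT A =====
-- A's generator loop: state = (batch, pending_batch); pending is flushed with False
-- when the next record arrives, remaining state is flushed with True at the end.
def pvAGo (batch_size : Int) : List Int → List Int → Option (List Int) → List (List Int × Bool)
  | [], batch, pending =>
      (match pending with
       | some p => [(p, true)]
       | none => []) ++
      (if batch ≠ [] then [(batch, true)] else [])
  | record :: rest, batch, pending =>
      let emitted : List (List Int × Bool) :=
        match pending with
        | some p => [(p, false)]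
        | none => []
      let batch' := batch ++ [record]
      if (batch'.length : Int) ≥ batch_size then
        emitted ++ pvAGo batch_size rest [] (some batch')
      else
        emitted ++ pvAGo batch_size rest batch' none

def batch_iterator_end (iterable : List Int) (batch_size : Int) : List (List Int × Bool) :=
  pvAGo batch_size iterable [] none

-- ===== PORT B =====
-- phase 1 of B: the inner `chunks` generator — plain batches, no flags
def pvChunks (batch_size : Int) : List Int → List Int → List (List Int)
  | [], batch => if batch ≠ [] then [batch] else []
  | record :: rest, batch =>
      let batch' := batch ++ [record]
      if (batch'.length : Int) ≥ batch_size then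
        batch' :: pvChunks batch_size rest []
      else
        pvChunks batch_size rest batch'

-- phase 2 of B: one-step lookahead over the chunk stream (`held` = previous chunk)
def pvLookahead : Option (List Int) → List (List Int) → List (List Int × Bool)
  | none, [] => []
  | some h, [] => [(h, true)]
  | none, c :: cs => pvLookahead (some c) cs
  | some h, c :: cs => (h, false) :: pvLookahead (some c) cs

def batch_iterator_end_alt (iterable : List Int) (batch_size : Int) : List (List Int × Bool) :=
  pvLookahead none (pvChunks batch_size iterable [])

-- ===== PRECONDITION & SPEC =====
def Spec_batch_iterator_end (iterable : List Int) (batch_size : Int) (out : List (List Int × Bool)) : Prop := out = batch_iterator_end_alt iterable batch_size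
instance (iterable : List Int) (batch_size : Int) (out : List (List Int × Bool)) : Decidable (Spec_batch_iterator_end iterable batch_size out) := by unfold Spec_batch_iterator_end; infer_instance

-- ===== CLAIM (what is proved, stated in full; the proofs are below) =====
def Claim_equal_batch_iterator_end : Prop := ∀ (iterable : List Int) (batch_size : Int), Dom_batch_iterator_end iterable batch_size → Spec_batch_iterator_end iterable batch_size (batch_iterator_end iterable batch_size)

-- ===== LEMMAS AND PROOFS =====

-- The chunker never returns an empty stream while its accumulator is non-empty.
theorem pvChunks_ne_nil (batch_size : Int) (rest : List Int) :
    ∀ (batch : List Int), batch ≠ [] → pvChunks batch_size rest batch ≠ [] := by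
  induction rest with
  | nil => intro batch hb; simp [pvChunks, hb]
  | cons r rest ih =>
      intro batch hb
      simp only [pvChunks]
      split
      · simp
      · exact ih (batch ++ [r]) (by simp)

-- Pushing a held chunk through a non-empty tail emits it with False.
theorem pvLookahead_some (h : List Int) (cs : List (List Int)) (hne : cs ≠ []) :
    pvLookahead (some h) cs = (h, false) :: pvLookahead none cs := by
  cases cs with
  | nil => exact absurd rfl hne
  | cons c cs => simp [pvLookahead]

-- Loop invariant: whenever pending_batch is set in A, batch has just been reset to [].
theorem pvAGo_eq (batch_size : Int) (rest : List Int) :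
    ∀ (batch : List Int) (pending : Option (List Int)),
      (∀ p, pending = some p → batch = []) →
      pvAGo batch_size rest batch pending
        = pvLookahead pending (pvChunks batch_size rest batch) := by
  induction rest with
  | nil =>
      intro batch pending hinv
      cases pending with
      | none =>
          simp only [pvAGo, pvChunks]
          split <;> simp [pvLookahead]
      | some p =>
          have hb : batch = [] := hinv p rfl
          subst hb
          simp [pvAGo, pvChunks, pvLookahead]
  | cons r rest ih =>
      intro batch pending hinv
      cases pending with
      | none =>
          simp only [pvAGo, pvChunks]
          split
        <;> simp only [List.nil_append]
          · rw [ih [] (some (batch ++ [r])) (by intro p h; rfl)]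
            simp [pvLookahead]
          · exact ih (batch ++ [r]) none (by intro p h; cases h)
      | some p =>
          have hb : batch = [] := hinv p rfl
          subst hb
          simp only [pvAGo, pvChunks]
          split
        <;> simp only [List.nil_append, List.cons_append]
          · rw [ih [] (some [r]) (by intro q h; rfl)]
            simp [pvLookahead]
          · rw [ih [r] none (by intro q h; cases h),
                pvLookahead_some p _ (pvChunks_ne_nil batch_size rest [r] (by simp))]

-- ===== VERDICT (by name: the statement is the Claim_ definition above) =====
theorem batch_iterator_end_spec : Claim_equal_batch_iterator_end := by
  intro iterable batch_size _
  unfold Spec_batch_iterator_end batch_iterator_end batch_iterator_end_alt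
  exact pvAGo_eq batch_size iterable [] none (by intro p h; cases h)
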